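-- pv_equiv track=rewrite | github.com/rak3rman/lumo | apps/api/src/scrapers/scraper_manager.py | _filter_insights_by_preferences
-- ===== SOURCE A (Python) =====
-- from typing import Dict, List, Any
--
-- def _filter_insights_by_preferences(insights: List[Dict], preferences: Dict) -> List[Dict]:
--     """Filter insights based on user preferences"""
--     if not preferences:
--         return insights
--
--     travel_style = preferences.get('travel_style', '').lower()
--     food_preference = preferences.get('food_preference', '').lower()
--
--     filtered = []
--     for insight in insights:
--         tip = insight.get('tip', '').lower()
--
--         # Check if insight matches preferences
--         if travel_style == 'cultural' and any(word in tip for word in ['traditional', 'cultural', 'historic']):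
--             filtered.append(insight)
--         elif travel_style == 'adventure' and any(word in tip for word in ['adventure', 'outdoor', 'hiking']):
--             filtered.append(insight)
--         elif food_preference and any(word in tip for word in ['food', 'restaurant', 'cuisine', 'dining']):
--             filtered.append(insight)
--         else:
--             # Include general tips
--             if any(word in tip for word in ['local', 'hidden', 'secret', 'authentic']):
--                 filtered.append(insight)
--
--     return filtered if filtered else insights
-- ===== SOURCE B (Python) =====
-- def _filter_insights_by_preferences(insights, preferences):
--     """Filter insights based on user preferences"""
--     if not preferences:
--         return insights
--
--     travel_style = preferences.get('travel_style', '').lower()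
--     food_preference = preferences.get('food_preference', '').lower()
--
--     keywords = ['local', 'hidden', 'secret', 'authentic']
--     if travel_style == 'cultural':
--         keywords += ['traditional', 'cultural', 'historic']
--     if travel_style == 'adventure':
--         keywords += ['adventure', 'outdoor', 'hiking']
--     if food_preference:
--         keywords += ['food', 'restaurant', 'cuisine', 'dining']
--
--     # inverted loop order: for each keyword, mark every insight whose tip contains it
--     matched = [False] * len(insights)
--     for word in keywords:
--         for i, insight in enumerate(insights):
--             if not matched[i] and word in insight.get('tip', '').lower():
--                 matched[i] = True
--
--     filtered = [insight for insight, m in zip(insights, matched) if m]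
--     return filtered or insights
-- ===== Notes on version B (the rewrite author's own statement) =====
-- stated objective: alternative
-- what changed: Inverts the loop nesting: instead of A's per-insight if/elif/else keyword chain, B builds the keyword list once from the preferences, then loops keyword-by-keyword over a boolean mark array (marking each insight whose tip contains the keyword) and finally collects the marked insights in order, keeping the empty-preferences and empty-result fallbacks.
import Mathlib
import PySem

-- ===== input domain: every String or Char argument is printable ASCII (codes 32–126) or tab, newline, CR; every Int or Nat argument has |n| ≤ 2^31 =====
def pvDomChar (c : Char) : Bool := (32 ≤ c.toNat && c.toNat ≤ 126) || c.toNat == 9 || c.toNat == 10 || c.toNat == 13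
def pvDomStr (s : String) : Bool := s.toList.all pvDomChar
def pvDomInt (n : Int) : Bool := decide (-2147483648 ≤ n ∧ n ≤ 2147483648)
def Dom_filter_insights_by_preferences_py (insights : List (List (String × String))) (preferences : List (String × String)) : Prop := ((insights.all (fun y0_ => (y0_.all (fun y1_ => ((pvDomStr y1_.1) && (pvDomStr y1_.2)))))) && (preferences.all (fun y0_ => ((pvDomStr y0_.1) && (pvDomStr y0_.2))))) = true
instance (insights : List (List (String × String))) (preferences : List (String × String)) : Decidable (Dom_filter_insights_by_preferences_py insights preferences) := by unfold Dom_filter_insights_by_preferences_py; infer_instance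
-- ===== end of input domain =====

-- B inverts the loop nesting: keyword list built once from the preferences, then a
-- keyword-outer marking pass over a boolean array, then one collection pass; same cost.

-- ===== PORT A =====
def filter_insights_by_preferences_py (insights : List (List (String × String))) (preferences : List (String × String)) : List (List (String × String)) :=
  if preferences.isEmpty then insights else
  let travel_style := PySem.Str.lower ((PySem.Dict.mk preferences).getD "travel_style" "")
  let food_preference := PySem.Str.lower ((PySem.Dict.mk preferences).getD "food_preference" "")
  let filtered := insights.foldl (fun acc insight =>
    -- tip = insight.get('tip', '').lower(), inlined into each membership test
    if travel_style == "cultural" && ["traditional", "cultural", "historic"].any (fun w => PySem.Str.isIn w (PySem.Str.lower ((PySem.Dict.mk insight).getD "tip" ""))) then acc ++ [insight]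
    else if travel_style == "adventure" && ["adventure", "outdoor", "hiking"].any (fun w => PySem.Str.isIn w (PySem.Str.lower ((PySem.Dict.mk insight).getD "tip" ""))) then acc ++ [insight]
    else if food_preference != "" && ["food", "restaurant", "cuisine", "dining"].any (fun w => PySem.Str.isIn w (PySem.Str.lower ((PySem.Dict.mk insight).getD "tip" ""))) then acc ++ [insight]
    else if ["local", "hidden", "secret", "authentic"].any (fun w => PySem.Str.isIn w (PySem.Str.lower ((PySem.Dict.mk insight).getD "tip" ""))) then acc ++ [insight]
    else acc) []
  if filtered.isEmpty then insights else filtered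

-- ===== PORT B =====
-- tip = insight.get('tip', '').lower()
def pvTip (insight : List (String × String)) : String :=
  PySem.Str.lower ((PySem.Dict.mk insight).getD "tip" "")

def filter_insights_by_preferences_py_alt (insights : List (List (String × String))) (preferences : List (String × String)) : List (List (String × String)) :=
  if preferences.isEmpty then insights else
  let travel_style := PySem.Str.lower ((PySem.Dict.mk preferences).getD "travel_style" "")
  let food_preference := PySem.Str.lower ((PySem.Dict.mk preferences).getD "food_preference" "")
  let keywords := ["local", "hidden", "secret", "authentic"]
    ++ (if travel_style == "cultural" then ["traditional", "cultural", "historic"] else [])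
    ++ (if travel_style == "adventure" then ["adventure", "outdoor", "hiking"] else [])
    ++ (if food_preference != "" then ["food", "restaurant", "cuisine", "dining"] else [])
  -- matched = [False]*len(insights); for word: for i, insight: if not matched[i] and word in tip: matched[i] = True
  -- the indexed in-place update over matched is exactly a positional zipWith with insights
  let matched := keywords.foldl (fun matched w =>
      List.zipWith (fun m insight => if !m && PySem.Str.isIn w (pvTip insight) then true else m) matched insights)
    (List.replicate insights.length false)
  -- filtered = [insight for insight, m in zip(insights, matched) if m]
  let filtered := (insights.zip matched).filterMap (fun p => if p.2 then some p.1 else none)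
  if filtered.isEmpty then insights else filtered

-- ===== PRECONDITION & SPEC =====
def Spec_filter_insights_by_preferences_py (insights : List (List (String × String))) (preferences : List (String × String)) (out : List (List (String × String))) : Prop := out = filter_insights_by_preferences_py_alt insights preferences
instance (insights : List (List (String × String))) (preferences : List (String × String)) (out : List (List (String × String))) : Decidable (Spec_filter_insights_by_preferences_py insights preferences out) := by unfold Spec_filter_insights_by_preferences_py; infer_instance

-- ===== CLAIM (what is proved, stated in full; the proofs are below) =====
def Claim_equal_filter_insights_by_preferences_py : Prop := ∀ (insights : List (List (String × String))) (preferences : List (String × String)), Dom_filter_insights_by_preferences_py insights preferences → Spec_filter_insights_by_preferences_py insights preferences (filter_insights_by_preferences_py insights preferences)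

-- ===== LEMMAS AND PROOFS =====

theorem pv_any_ite (c : Bool) (l : List String) (p : String → Bool) :
    (if c then l else []).any p = (c && l.any p) := by
  cases c <;> simp

-- the if/elif/else chain as a pure boolean identity
theorem pv_bool (b1 b2 b3 a1 a2 a3 g : Bool) :
    (if b1 && a1 then true else if b2 && a2 then true else if b3 && a3 then true else g)
    = (g || b1 && a1 || b2 && a2 || b3 && a3) := by
  cases b1 <;> cases b2 <;> cases b3 <;> cases a1 <;> cases a2 <;> cases a3 <;> cases g <;> rfl

-- per-insight: A's chain decides exactly the any-over-keywords test
theorem pv_pred_eq (ts fp : String) (insight : List (String × String)) :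
    (if ts == "cultural" && ["traditional", "cultural", "historic"].any (fun w => PySem.Str.isIn w (PySem.Str.lower ((PySem.Dict.mk insight).getD "tip" ""))) then true
     else if ts == "adventure" && ["adventure", "outdoor", "hiking"].any (fun w => PySem.Str.isIn w (PySem.Str.lower ((PySem.Dict.mk insight).getD "tip" ""))) then true
     else if fp != "" && ["food", "restaurant", "cuisine", "dining"].any (fun w => PySem.Str.isIn w (PySem.Str.lower ((PySem.Dict.mk insight).getD "tip" ""))) then true
     else ["local", "hidden", "secret", "authentic"].any (fun w => PySem.Str.isIn w (PySem.Str.lower ((PySem.Dict.mk insight).getD "tip" ""))))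
    = (["local", "hidden", "secret", "authentic"]
        ++ (if ts == "cultural" then ["traditional", "cultural", "historic"] else [])
        ++ (if ts == "adventure" then ["adventure", "outdoor", "hiking"] else [])
        ++ (if fp != "" then ["food", "restaurant", "cuisine", "dining"] else [])).any
        (fun w => PySem.Str.isIn w (PySem.Str.lower ((PySem.Dict.mk insight).getD "tip" ""))) := by
  rw [List.any_append, List.any_append, List.any_append, pv_any_ite, pv_any_ite, pv_any_ite,
    pv_bool, Bool.or_assoc, Bool.or_assoc]

-- A's loop body is an 'append iff predicate' step for the combined predicate
theorem pv_step (ts fp : String) (insight : List (String × String)) (acc : List (List (String × String))) :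
    (if ts == "cultural" && ["traditional", "cultural", "historic"].any (fun w => PySem.Str.isIn w (PySem.Str.lower ((PySem.Dict.mk insight).getD "tip" ""))) then acc ++ [insight]
     else if ts == "adventure" && ["adventure", "outdoor", "hiking"].any (fun w => PySem.Str.isIn w (PySem.Str.lower ((PySem.Dict.mk insight).getD "tip" ""))) then acc ++ [insight]
     else if fp != "" && ["food", "restaurant", "cuisine", "dining"].any (fun w => PySem.Str.isIn w (PySem.Str.lower ((PySem.Dict.mk insight).getD "tip" ""))) then acc ++ [insight]
     else if ["local", "hidden", "secret", "authentic"].any (fun w => PySem.Str.isIn w (PySem.Str.lower ((PySem.Dict.mk insight).getD "tip" ""))) then acc ++ [insight]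
     else acc)
    = (if (["local", "hidden", "secret", "authentic"]
            ++ (if ts == "cultural" then ["traditional", "cultural", "historic"] else [])
            ++ (if ts == "adventure" then ["adventure", "outdoor", "hiking"] else [])
            ++ (if fp != "" then ["food", "restaurant", "cuisine", "dining"] else [])).any
            (fun w => PySem.Str.isIn w (PySem.Str.lower ((PySem.Dict.mk insight).getD "tip" "")))
       then acc ++ [insight] else acc) := by
  rw [← pv_pred_eq ts fp insight]
  split_ifs <;> simp_all

theorem pv_foldl_eq_filter (ts fp : String) (insights : List (List (String × String))) :
    insights.foldl (fun acc insight =>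
      if ts == "cultural" && ["traditional", "cultural", "historic"].any (fun w => PySem.Str.isIn w (PySem.Str.lower ((PySem.Dict.mk insight).getD "tip" ""))) then acc ++ [insight]
      else if ts == "adventure" && ["adventure", "outdoor", "hiking"].any (fun w => PySem.Str.isIn w (PySem.Str.lower ((PySem.Dict.mk insight).getD "tip" ""))) then acc ++ [insight]
      else if fp != "" && ["food", "restaurant", "cuisine", "dining"].any (fun w => PySem.Str.isIn w (PySem.Str.lower ((PySem.Dict.mk insight).getD "tip" ""))) then acc ++ [insight]
      else if ["local", "hidden", "secret", "authentic"].any (fun w => PySem.Str.isIn w (PySem.Str.lower ((PySem.Dict.mk insight).getD "tip" ""))) then acc ++ [insight]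
      else acc) []
    = insights.filter (fun insight =>
        (["local", "hidden", "secret", "authentic"]
          ++ (if ts == "cultural" then ["traditional", "cultural", "historic"] else [])
          ++ (if ts == "adventure" then ["adventure", "outdoor", "hiking"] else [])
          ++ (if fp != "" then ["food", "restaurant", "cuisine", "dining"] else [])).any
          (fun w => PySem.Str.isIn w (PySem.Str.lower ((PySem.Dict.mk insight).getD "tip" "")))) := by
  have hstep : ∀ (acc : List (List (String × String))) (insight : List (String × String)),
      (if ts == "cultural" && ["traditional", "cultural", "historic"].any (fun w => PySem.Str.isIn w (PySem.Str.lower ((PySem.Dict.mk insight).getD "tip" ""))) then acc ++ [insight]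
       else if ts == "adventure" && ["adventure", "outdoor", "hiking"].any (fun w => PySem.Str.isIn w (PySem.Str.lower ((PySem.Dict.mk insight).getD "tip" ""))) then acc ++ [insight]
       else if fp != "" && ["food", "restaurant", "cuisine", "dining"].any (fun w => PySem.Str.isIn w (PySem.Str.lower ((PySem.Dict.mk insight).getD "tip" ""))) then acc ++ [insight]
       else if ["local", "hidden", "secret", "authentic"].any (fun w => PySem.Str.isIn w (PySem.Str.lower ((PySem.Dict.mk insight).getD "tip" ""))) then acc ++ [insight]
       else acc)
      = (if (["local", "hidden", "secret", "authentic"]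
              ++ (if ts == "cultural" then ["traditional", "cultural", "historic"] else [])
              ++ (if ts == "adventure" then ["adventure", "outdoor", "hiking"] else [])
              ++ (if fp != "" then ["food", "restaurant", "cuisine", "dining"] else [])).any
              (fun w => PySem.Str.isIn w (PySem.Str.lower ((PySem.Dict.mk insight).getD "tip" "")))
         then acc ++ [insight] else acc) := fun acc insight => pv_step ts fp insight acc
  calc insights.foldl _ []
      = insights.foldl (fun acc insight =>
          if (["local", "hidden", "secret", "authentic"]
              ++ (if ts == "cultural" then ["traditional", "cultural", "historic"] else [])
              ++ (if ts == "adventure" then ["adventure", "outdoor", "hiking"] else [])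
              ++ (if fp != "" then ["food", "restaurant", "cuisine", "dining"] else [])).any
              (fun w => PySem.Str.isIn w (PySem.Str.lower ((PySem.Dict.mk insight).getD "tip" "")))
          then acc ++ [insight] else acc) [] := by
        exact congrFun (congrFun (congrArg List.foldl (funext fun acc => funext fun insight => hstep acc insight)) []) insights
    _ = _ := (PySem.List.foldl_append_if_eq_filter (fun insight =>
        ((["local", "hidden", "secret", "authentic"]
          ++ (if ts == "cultural" then ["traditional", "cultural", "historic"] else [])
          ++ (if ts == "adventure" then ["adventure", "outdoor", "hiking"] else [])
          ++ (if fp != "" then ["food", "restaurant", "cuisine", "dining"] else [])).any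
          (fun w => PySem.Str.isIn w (PySem.Str.lower ((PySem.Dict.mk insight).getD "tip" ""))))) insights []).trans (List.nil_append _)

-- B-side lemmas: the marking fold computes, positionally, 'some keyword hits this tip'

theorem pv_zipWith_fst {α β : Type} : ∀ (a : List α) (b : List β), a.length = b.length →
    List.zipWith (fun m _ => m) a b = a := by
  intro a; induction a with
  | nil => intro b _; rfl
  | cons x xs ih => intro b h; cases b with
    | nil => simp at h
    | cons y ys => simp at h; simp [List.zipWith, ih ys h]

theorem pv_zipWith_comp {α β γ : Type} (f : γ → β → γ) (g : α → β → γ) :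
    ∀ (a : List α) (b : List β),
    List.zipWith f (List.zipWith g a b) b = List.zipWith (fun x y => f (g x y) y) a b := by
  intro a; induction a with
  | nil => intro b; rfl
  | cons x xs ih => intro b; cases b with
    | nil => rfl
    | cons y ys => simp [List.zipWith, ih ys]

theorem pv_zipWith_replicate_map {α γ : Type} (c : Bool) (f : Bool → α → γ) :
    ∀ (l : List α), List.zipWith f (List.replicate l.length c) l = l.map (f c) := by
  intro l; induction l with
  | nil => rfl
  | cons x xs ih => simp [List.replicate, ih]

-- the in-place mark update is pointwise boolean 'or'
theorem pv_mark_or (w : String) (p : String → List (String × String) → Bool)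
    (matched : List Bool) (insights : List (List (String × String))) :
    List.zipWith (fun m insight => if !m && p w insight then true else m) matched insights
    = List.zipWith (fun m insight => m || p w insight) matched insights := by
  congr 1; funext m insight; cases m <;> simp

theorem pv_marks (p : String → List (String × String) → Bool)
    (insights : List (List (String × String))) :
    ∀ (kws : List String) (m0 : List Bool), m0.length = insights.length →
    kws.foldl (fun matched w =>
        List.zipWith (fun m insight => if !m && p w insight then true else m) matched insights) m0
    = List.zipWith (fun m insight => m || kws.any (fun w => p w insight)) m0 insights := by
  intro kws; induction kws with
  | nil =>
    intro m0 h
    simp only [List.foldl_nil, List.any_nil, Bool.or_false]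
    exact (pv_zipWith_fst m0 insights h).symm
  | cons w ws ih =>
    intro m0 h
    simp only [List.foldl_cons]
    rw [pv_mark_or, ih _ (by simp [h]), pv_zipWith_comp]
    congr 1; funext m insight
    simp [Bool.or_assoc]

theorem pv_filterMap_zip {α : Type} (q : α → Bool) :
    ∀ (l : List α), ((l.zip (l.map q)).filterMap (fun p => if p.2 then some p.1 else none))
      = l.filter q := by
  intro l; induction l with
  | nil => rfl
  | cons x xs ih =>
    simp only [List.map_cons, List.zip_cons_cons, List.filterMap_cons, List.filter_cons]
    cases h : q x <;> simp [ih]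

-- B's whole mark-and-collect pipeline is the single filter
theorem pv_alt_filtered (kws : List String) (insights : List (List (String × String))) :
    ((insights.zip (kws.foldl (fun matched w =>
        List.zipWith (fun m insight => if !m && PySem.Str.isIn w (pvTip insight) then true else m) matched insights)
      (List.replicate insights.length false))).filterMap (fun p => if p.2 then some p.1 else none))
    = insights.filter (fun insight => kws.any (fun w => PySem.Str.isIn w (pvTip insight))) := by
  rw [pv_marks (fun w insight => PySem.Str.isIn w (pvTip insight)) insights kws _ (by simp),
    pv_zipWith_replicate_map, pv_filterMap_zip]
  simp

-- ===== VERDICT (by name: the statement is the Claim_ definition above) =====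
theorem filter_insights_by_preferences_py_spec : Claim_equal_filter_insights_by_preferences_py := by
  intro insights preferences _
  unfold Spec_filter_insights_by_preferences_py
  unfold filter_insights_by_preferences_py filter_insights_by_preferences_py_alt
  by_cases h : preferences.isEmpty = true
  · rw [if_pos h, if_pos h]
  · rw [if_neg h, if_neg h]
    simp only [pv_foldl_eq_filter, pv_alt_filtered]
    simp only [pvTip]
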